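-- pv_equiv track=rewrite | github.com/manuprotocol/python_programs | tuple_ex_digit.py | find_data
-- ===== SOURCE A (Python) =====
-- def find_data(test_list):
--     new_list=[]
--     for tup in test_list:
--
--         for value in range(len(tup)):
--             if(tup[value] not in new_list):
--                 new_list.append(tup[value])
--
--     k_list=[]
--     for fi in new_list:
--         if(fi > 9):
--
--             while(fi !=0):
--                 x=fi % 10
--                 k_list.append(x)
--                 fi=fi // 10
--         else:
--             k_list.append(fi)
--
--     return k_list
-- ===== SOURCE B (Python) =====
-- def find_data(test_list):
--     uniq = dict.fromkeys(v for tup in test_list for v in tup)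
--     k_list = []
--     for fi in uniq:
--         if fi > 9:
--             k_list.extend(ord(c) - 48 for c in str(fi)[::-1])
--         else:
--             k_list.append(fi)
--     return k_list
-- ===== Notes on version B (the rewrite author's own statement) =====
-- stated objective: faster
-- what changed: B dedups via dict.fromkeys over the flattened values instead of A's 'not in list' scan per element, and emits each big value's reversed digits from str(fi)[::-1] instead of A's mod/div while-loop.
import Mathlib
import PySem

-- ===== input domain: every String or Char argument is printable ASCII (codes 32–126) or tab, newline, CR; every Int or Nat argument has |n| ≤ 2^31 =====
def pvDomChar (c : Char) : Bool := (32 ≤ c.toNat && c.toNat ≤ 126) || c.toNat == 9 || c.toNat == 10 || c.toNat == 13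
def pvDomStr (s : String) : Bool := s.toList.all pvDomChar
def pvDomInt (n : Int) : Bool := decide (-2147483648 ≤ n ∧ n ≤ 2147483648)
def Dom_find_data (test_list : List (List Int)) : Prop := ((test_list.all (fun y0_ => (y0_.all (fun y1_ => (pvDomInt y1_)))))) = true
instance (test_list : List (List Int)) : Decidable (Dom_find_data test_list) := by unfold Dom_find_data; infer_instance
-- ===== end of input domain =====

-- B replaces A's quadratic list-membership dedup by dict.fromkeys and A's mod/div
-- while-loop by reversed str(fi) digit characters; same return value everywhere.

-- ===== PORT A =====
-- A's inner while-loop: appends fi % 10 and sets fi = fi // 10 until fi == 0.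
-- It is only entered with fi > 9; the 'fi ≤ 0' guard (instead of 'fi = 0') makes
-- the recursion total and coincides with 'fi != 0' on every reachable call.
def find_data_digitLoop (fi : Int) (k : List Int) : List Int :=
  if _h : fi ≤ 0 then k
  else find_data_digitLoop (PySem.Int.floordiv fi 10) (k ++ [PySem.Int.mod fi 10])
termination_by fi.toNat
decreasing_by
  simp only [PySem.Int.floordiv_eq_ediv_of_pos (by norm_num : (0:Int) < 10)]
  omega

def find_data (test_list : List (List Int)) : List Int :=
  let new_list := test_list.foldl
    (fun new_list tup =>
      (PySem.List.pyRange 0 (PySem.List.len tup) 1).foldl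
        (fun nl value =>
          if PySem.List.pyGetD tup value 0 ∈ nl then nl
          else nl ++ [PySem.List.pyGetD tup value 0]) new_list) []
  new_list.foldl (fun k fi => if fi > 9 then find_data_digitLoop fi k else k ++ [fi]) []

-- ===== PORT B =====
def find_data_alt (test_list : List (List Int)) : List Int :=
  let uniq := PySem.List.dedup (test_list.flatMap id)
  uniq.foldl
    (fun k fi =>
      if fi > 9 then
        k ++ (PySem.Int.toChars fi).reverse.map (fun c => (c.toNat : Int) - 48)
      else k ++ [fi]) []

-- ===== PRECONDITION & SPEC =====
def Spec_find_data (test_list : List (List Int)) (out : List Int) : Prop := out = find_data_alt test_list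
instance (test_list : List (List Int)) (out : List Int) : Decidable (Spec_find_data test_list out) := by unfold Spec_find_data; infer_instance

-- ===== CLAIM (what is proved, stated in full; the proofs are below) =====
def Claim_equal_find_data : Prop := ∀ (test_list : List (List Int)), Dom_find_data test_list → Spec_find_data test_list (find_data test_list)

-- ===== LEMMAS AND PROOFS =====

-- Phase 1: A's nested index loop with list-membership appends is ordered dedup of the flattened input.
lemma find_data_phase1 (test_list : List (List Int)) :
    test_list.foldl
      (fun new_list tup =>
        (PySem.List.pyRange 0 (PySem.List.len tup) 1).foldl
          (fun nl value =>
            if PySem.List.pyGetD tup value 0 ∈ nl then nl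
            else nl ++ [PySem.List.pyGetD tup value 0]) new_list) []
    = PySem.List.dedup (test_list.flatMap id) := by
  have hstep : ∀ (nl tup : List Int),
      (PySem.List.pyRange 0 (PySem.List.len tup) 1).foldl
        (fun nl value =>
          if PySem.List.pyGetD tup value 0 ∈ nl then nl
          else nl ++ [PySem.List.pyGetD tup value 0]) nl
      = tup.foldl (fun acc x => if x ∈ acc then acc else acc ++ [x]) nl := by
    intro nl tup
    exact PySem.List.foldl_pyRange_zero_pyGetD tup 0
      (fun acc x => if x ∈ acc then acc else acc ++ [x]) nl
  simp only [hstep]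
  rw [show (fun acc x => if x ∈ acc then acc else acc ++ [x]) = PySem.Set.add (α := Int) from ?_]
  · rw [List.flatMap_id, PySem.List.dedup_eq_ofList, PySem.Set.ofList_eq_foldl,
      ← List.foldl_flatten]
  · funext acc x
    simp [PySem.Set.add, PySem.Set.contains]

-- Core's toDigitsCore produces the base-10 digits, most significant first.
lemma toDigitsCore_eq_digits (f : Nat) :
    ∀ (n : Nat) (acc : List Char), 0 < n → n < f →
      Nat.toDigitsCore 10 f n acc = ((Nat.digits 10 n).map Nat.digitChar).reverse ++ acc := by
  induction f with
  | zero => intro n acc h0 hf; omega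
  | succ f ih =>
    intro n acc h0 hf
    rw [Nat.toDigitsCore]
    by_cases hq : n / 10 = 0
    · have hn : n < 10 := by omega
      simp [hq, Nat.digits_def' (by norm_num : 1 < 10) h0, Nat.mod_eq_of_lt hn]
    · have h0' : 0 < n / 10 := Nat.pos_of_ne_zero hq
      have hf' : n / 10 < f := by omega
      simp only [hq, if_false]
      rw [ih (n / 10) _ h0' hf',
        Nat.digits_def' (by norm_num : 1 < 10) h0]
      simp

lemma digitChar_val (d : Nat) (hd : d < 10) :
    ((Nat.digitChar d).toNat : Int) - 48 = (d : Int) := by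
  interval_cases d <;> decide

-- A's while-loop produces the least-significant-first digits of fi.
lemma digitLoop_eq_digits (fi : Int) (k : List Int) (h : 0 < fi) :
    find_data_digitLoop fi k = k ++ (Nat.digits 10 fi.toNat).map (fun d : Nat => (d : Int)) := by
  rw [find_data_digitLoop]
  have hfi : fi = ((fi.toNat : Nat) : Int) := by omega
  rw [dif_neg (by omega)]
  have hmod : PySem.Int.mod fi 10 = ((fi.toNat % 10 : Nat) : Int) := by
    rw [hfi]; exact_mod_cast PySem.Int.mod_natCast fi.toNat 10
  have hdiv : PySem.Int.floordiv fi 10 = ((fi.toNat / 10 : Nat) : Int) := by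
    rw [hfi]; exact_mod_cast PySem.Int.floordiv_natCast fi.toNat 10
  by_cases hq : fi.toNat / 10 = 0
  · rw [hdiv, hq]
    rw [find_data_digitLoop, dif_pos (by norm_num)]
    rw [Nat.digits_def' (by norm_num : 1 < 10) (by omega), hq]
    simp
    omega
  · have hrec := digitLoop_eq_digits (PySem.Int.floordiv fi 10)
      (k ++ [PySem.Int.mod fi 10]) (by rw [hdiv]; exact_mod_cast Nat.pos_of_ne_zero hq)
    rw [hrec, Nat.digits_def' (by norm_num : 1 < 10) (by omega : 0 < fi.toNat)]
    have h2 : (PySem.Int.floordiv fi 10).toNat = fi.toNat / 10 := by rw [hdiv]; omega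
    simp
    refine ⟨by omega, ?_⟩
    rw [show (fi / 10).toNat = fi.toNat / 10 by omega]
  termination_by fi.toNat
  decreasing_by
    simp only [PySem.Int.floordiv_eq_ediv_of_pos (by norm_num : (0:Int) < 10)]
    omega

-- B's reversed string digits equal A's arithmetic digits, for fi > 9.
lemma toChars_rev_eq_digits (fi : Int) (h : 9 < fi) :
    (PySem.Int.toChars fi).reverse.map (fun c => (c.toNat : Int) - 48)
      = (Nat.digits 10 fi.toNat).map (fun d : Nat => (d : Int)) := by
  rw [PySem.Int.toChars, if_neg (by omega), Nat.toDigits,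
    toDigitsCore_eq_digits (fi.toNat + 1) fi.toNat [] (by omega) (by omega)]
  rw [List.append_nil, List.reverse_reverse, List.map_map]
  refine List.map_congr_left ?_
  intro d hd
  exact digitChar_val d (Nat.digits_lt_base (by norm_num) hd)

-- ===== VERDICT (by name: the statement is the Claim_ definition above) =====
theorem find_data_spec : Claim_equal_find_data := by
  intro test_list _
  unfold Spec_find_data find_data find_data_alt
  rw [find_data_phase1]
  refine PySem.List.foldl_congr_mem _ _ _ _ ?_
  intro k fi _
  by_cases h : 9 < fi
  · rw [if_pos h, if_pos h, digitLoop_eq_digits fi k (by omega), toChars_rev_eq_digits fi h]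
  · rw [if_neg h, if_neg h]
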